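-- pv_equiv track=rewrite | github.com/wukong930/Zeus | backend/app/services/news/event_publisher.py | infer_category_from_symbol
-- ===== SOURCE A (Python) =====
-- def infer_category_from_symbol(symbol: str) -> str:
--     root = "".join(char for char in symbol.upper() if char.isalpha())
--     if root in {"RB", "HC", "I", "J", "JM", "SF", "SM"}:
--         return "ferrous"
--     if root in {"RU", "NR", "BR"}:
--         return "rubber"
--     if root in {"SC", "FU", "TA", "EG", "MA", "PP", "L", "V"}:
--         return "energy"
--     if root in {"CU", "AL", "ZN", "NI", "SN", "PB"}:
--         return "nonferrous"
--     if root in {"M", "Y", "P", "C", "A", "CF", "SR"}: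
--         return "agriculture"
--     return "unknown"
-- ===== SOURCE B (Python) =====
-- # Character trie: walk the (at most two) letters of the root through a
-- # two-level decision tree instead of building a root string and testing it
-- # against five category sets.
-- TRIE = [
--     ('R', None, [('B', 'ferrous'), ('U', 'rubber')]),
--     ('H', None, [('C', 'ferrous')]),
--     ('I', 'ferrous', []),
--     ('J', 'ferrous', [('M', 'ferrous')]),
--     ('S', None, [('F', 'ferrous'), ('M', 'ferrous'), ('C', 'energy'),
--                  ('N', 'nonferrous'), ('R', 'agriculture')]),
--     ('N', None, [('R', 'rubber'), ('I', 'nonferrous')]),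
--     ('B', None, [('R', 'rubber')]),
--     ('F', None, [('U', 'energy')]),
--     ('T', None, [('A', 'energy')]),
--     ('E', None, [('G', 'energy')]),
--     ('M', 'agriculture', [('A', 'energy')]),
--     ('P', 'agriculture', [('P', 'energy'), ('B', 'nonferrous')]),
--     ('L', 'energy', []),
--     ('V', 'energy', []),
--     ('C', 'agriculture', [('U', 'nonferrous'), ('F', 'agriculture')]),
--     ('A', 'agriculture', [('L', 'nonferrous')]),
--     ('Z', None, [('N', 'nonferrous')]),
--     ('Y', 'agriculture', []),
-- ]
--
--
-- def infer_category_from_symbol(symbol: str) -> str: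
--     letters = [c for c in symbol.upper() if c.isalpha()]
--     if not letters:
--         return "unknown"
--     for ch, term, kids in TRIE:
--         if ch == letters[0]:
--             if len(letters) == 1:
--                 return term if term is not None else "unknown"
--             if len(letters) > 2:
--                 return "unknown"
--             for ch2, cat in kids:
--                 if ch2 == letters[1]:
--                     return cat
--             return "unknown"
--     return "unknown"
-- ===== Notes on version B (the rewrite author's own statement) =====
-- stated objective: alternative
-- what changed: Replaces building a root string and testing it against five category sets with a two-level character trie: the first and second letter of the root are walked through an explicit decision tree, no root string is ever built.
import Mathlib
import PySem

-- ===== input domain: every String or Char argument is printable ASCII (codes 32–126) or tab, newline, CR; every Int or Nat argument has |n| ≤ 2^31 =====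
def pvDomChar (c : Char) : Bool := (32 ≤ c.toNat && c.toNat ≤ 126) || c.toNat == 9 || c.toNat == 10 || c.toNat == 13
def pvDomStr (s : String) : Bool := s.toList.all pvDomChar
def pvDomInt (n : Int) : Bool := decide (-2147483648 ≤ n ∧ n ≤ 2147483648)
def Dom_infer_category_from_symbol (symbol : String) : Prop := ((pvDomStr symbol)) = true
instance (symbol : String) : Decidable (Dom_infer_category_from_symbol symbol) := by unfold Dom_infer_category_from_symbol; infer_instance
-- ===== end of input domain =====

-- B walks the root's letters through a two-level character trie instead of building a root string and testing it against five category sets (objective: alternative).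

-- ===== PORT A =====
def infer_category_from_symbol (symbol : String) : String :=
  let root : String := String.ofList (((PySem.Str.upper symbol).toList).filter PySem.Chars.isalpha)
  if root ∈ ["RB", "HC", "I", "J", "JM", "SF", "SM"] then "ferrous"
  else if root ∈ ["RU", "NR", "BR"] then "rubber"
  else if root ∈ ["SC", "FU", "TA", "EG", "MA", "PP", "L", "V"] then "energy"
  else if root ∈ ["CU", "AL", "ZN", "NI", "SN", "PB"] then "nonferrous"
  else if root ∈ ["M", "Y", "P", "C", "A", "CF", "SR"] then "agriculture"
  else "unknown"

-- ===== PORT B =====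
def pvTrie : List (Char × Option String × List (Char × String)) :=
  [('R', none, [('B', "ferrous"), ('U', "rubber")]),
   ('H', none, [('C', "ferrous")]),
   ('I', some "ferrous", []),
   ('J', some "ferrous", [('M', "ferrous")]),
   ('S', none, [('F', "ferrous"), ('M', "ferrous"), ('C', "energy"),
                ('N', "nonferrous"), ('R', "agriculture")]),
   ('N', none, [('R', "rubber"), ('I', "nonferrous")]),
   ('B', none, [('R', "rubber")]),
   ('F', none, [('U', "energy")]),
   ('T', none, [('A', "energy")]),
   ('E', none, [('G', "energy")]),
   ('M', some "agriculture", [('A', "energy")]),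
   ('P', some "agriculture", [('P', "energy"), ('B', "nonferrous")]),
   ('L', some "energy", []),
   ('V', some "energy", []),
   ('C', some "agriculture", [('U', "nonferrous"), ('F', "agriculture")]),
   ('A', some "agriculture", [('L', "nonferrous")]),
   ('Z', none, [('N', "nonferrous")]),
   ('Y', some "agriculture", [])]

def infer_category_from_symbol_alt (symbol : String) : String :=
  let letters : List Char := ((PySem.Str.upper symbol).toList).filter PySem.Chars.isalpha
  match letters with
  | [] => "unknown"
  | c1 :: rest =>
    match pvTrie.find? (fun e => e.1 == c1) with
    | none => "unknown"
    | some (_, term, kids) =>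
      match rest with
      | [] => term.getD "unknown"
      | [c2] =>
        match kids.find? (fun e => e.1 == c2) with
        | some (_, cat) => cat
        | none => "unknown"
      | _ => "unknown"

-- ===== PRECONDITION & SPEC =====
def Spec_infer_category_from_symbol (symbol : String) (out : String) : Prop := out = infer_category_from_symbol_alt symbol
instance (symbol : String) (out : String) : Decidable (Spec_infer_category_from_symbol symbol out) := by unfold Spec_infer_category_from_symbol; infer_instance

-- ===== CLAIM (what is proved, stated in full; the proofs are below) =====
def Claim_equal_infer_category_from_symbol : Prop := ∀ (symbol : String), Dom_infer_category_from_symbol symbol → Spec_infer_category_from_symbol symbol (infer_category_from_symbol symbol)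

-- ===== LEMMAS AND PROOFS =====

-- the branch chain on the root string and the trie walk on its letter list agree on every letter list
set_option maxHeartbeats 4000000 in
set_option maxRecDepth 8192 in
theorem pvChain_eq_trie (ls : List Char) :
    (if String.ofList ls ∈ ["RB", "HC", "I", "J", "JM", "SF", "SM"] then "ferrous"
     else if String.ofList ls ∈ ["RU", "NR", "BR"] then "rubber"
     else if String.ofList ls ∈ ["SC", "FU", "TA", "EG", "MA", "PP", "L", "V"] then "energy"
     else if String.ofList ls ∈ ["CU", "AL", "ZN", "NI", "SN", "PB"] then "nonferrous"
     else if String.ofList ls ∈ ["M", "Y", "P", "C", "A", "CF", "SR"] then "agriculture"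
     else "unknown")
    = (match ls with
       | [] => "unknown"
       | c1 :: rest =>
         match pvTrie.find? (fun e => e.1 == c1) with
         | none => "unknown"
         | some (_, term, kids) =>
           match rest with
           | [] => term.getD "unknown"
           | [c2] =>
             match kids.find? (fun e => e.1 == c2) with
             | some (_, cat) => cat
             | none => "unknown"
           | _ => "unknown") := by
  match ls with
  | [] => decide
  | [c1] =>
    by_cases h0 : c1 = 'R'
    · subst h0; decide
    by_cases h1 : c1 = 'H'
    · subst h1; decide
    by_cases h2 : c1 = 'I'
    · subst h2; decide
    by_cases h3 : c1 = 'J'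
    · subst h3; decide
    by_cases h4 : c1 = 'S'
    · subst h4; decide
    by_cases h5 : c1 = 'N'
    · subst h5; decide
    by_cases h6 : c1 = 'B'
    · subst h6; decide
    by_cases h7 : c1 = 'F'
    · subst h7; decide
    by_cases h8 : c1 = 'T'
    · subst h8; decide
    by_cases h9 : c1 = 'E'
    · subst h9; decide
    by_cases h10 : c1 = 'M'
    · subst h10; decide
    by_cases h11 : c1 = 'P'
    · subst h11; decide
    by_cases h12 : c1 = 'L'
    · subst h12; decide
    by_cases h13 : c1 = 'V'
    · subst h13; decide
    by_cases h14 : c1 = 'C'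
    · subst h14; decide
    by_cases h15 : c1 = 'A'
    · subst h15; decide
    by_cases h16 : c1 = 'Z'
    · subst h16; decide
    by_cases h17 : c1 = 'Y'
    · subst h17; decide
    have e0 : ('R' == c1) = false := by simp only [beq_eq_false_iff_ne]; exact fun hh => h0 hh.symm
    have e1 : ('H' == c1) = false := by simp only [beq_eq_false_iff_ne]; exact fun hh => h1 hh.symm
    have e2 : ('I' == c1) = false := by simp only [beq_eq_false_iff_ne]; exact fun hh => h2 hh.symm
    have e3 : ('J' == c1) = false := by simp only [beq_eq_false_iff_ne]; exact fun hh => h3 hh.symm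
    have e4 : ('S' == c1) = false := by simp only [beq_eq_false_iff_ne]; exact fun hh => h4 hh.symm
    have e5 : ('N' == c1) = false := by simp only [beq_eq_false_iff_ne]; exact fun hh => h5 hh.symm
    have e6 : ('B' == c1) = false := by simp only [beq_eq_false_iff_ne]; exact fun hh => h6 hh.symm
    have e7 : ('F' == c1) = false := by simp only [beq_eq_false_iff_ne]; exact fun hh => h7 hh.symm
    have e8 : ('T' == c1) = false := by simp only [beq_eq_false_iff_ne]; exact fun hh => h8 hh.symm
    have e9 : ('E' == c1) = false := by simp only [beq_eq_false_iff_ne]; exact fun hh => h9 hh.symm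
    have e10 : ('M' == c1) = false := by simp only [beq_eq_false_iff_ne]; exact fun hh => h10 hh.symm
    have e11 : ('P' == c1) = false := by simp only [beq_eq_false_iff_ne]; exact fun hh => h11 hh.symm
    have e12 : ('L' == c1) = false := by simp only [beq_eq_false_iff_ne]; exact fun hh => h12 hh.symm
    have e13 : ('V' == c1) = false := by simp only [beq_eq_false_iff_ne]; exact fun hh => h13 hh.symm
    have e14 : ('C' == c1) = false := by simp only [beq_eq_false_iff_ne]; exact fun hh => h14 hh.symm
    have e15 : ('A' == c1) = false := by simp only [beq_eq_false_iff_ne]; exact fun hh => h15 hh.symm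
    have e16 : ('Z' == c1) = false := by simp only [beq_eq_false_iff_ne]; exact fun hh => h16 hh.symm
    have e17 : ('Y' == c1) = false := by simp only [beq_eq_false_iff_ne]; exact fun hh => h17 hh.symm
    simp [pvTrie, List.find?, String.ofList_eq, e0, h0, e1, h1, e2, h2, e3, h3, e4, h4, e5, h5, e6, h6, e7, h7, e8, h8, e9, h9, e10, h10, e11, h11, e12, h12, e13, h13, e14, h14, e15, h15, e16, h16, e17, h17]
  | [c1, c2] =>
    by_cases h0 : c1 = 'R'
    case pos =>
      subst h0
      by_cases g0 : c2 = 'B'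
      · subst g0; decide
      by_cases g1 : c2 = 'U'
      · subst g1; decide
      have f0 : ('B' == c2) = false := by simp only [beq_eq_false_iff_ne]; exact fun hh => g0 hh.symm
      have f1 : ('U' == c2) = false := by simp only [beq_eq_false_iff_ne]; exact fun hh => g1 hh.symm
      simp [pvTrie, List.find?, String.ofList_eq, f0, g0, f1, g1]
    by_cases h1 : c1 = 'H'
    case pos =>
      subst h1
      by_cases g0 : c2 = 'C'
      · subst g0; decide
      have f0 : ('C' == c2) = false := by simp only [beq_eq_false_iff_ne]; exact fun hh => g0 hh.symm
      simp [pvTrie, List.find?, String.ofList_eq, f0, g0]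
    by_cases h2 : c1 = 'I'
    case pos =>
      subst h2
      simp [pvTrie, List.find?, String.ofList_eq]
    by_cases h3 : c1 = 'J'
    case pos =>
      subst h3
      by_cases g0 : c2 = 'M'
      · subst g0; decide
      have f0 : ('M' == c2) = false := by simp only [beq_eq_false_iff_ne]; exact fun hh => g0 hh.symm
      simp [pvTrie, List.find?, String.ofList_eq, f0, g0]
    by_cases h4 : c1 = 'S'
    case pos =>
      subst h4
      by_cases g0 : c2 = 'F'
      · subst g0; decide
      by_cases g1 : c2 = 'M'
      · subst g1; decide
      by_cases g2 : c2 = 'C'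
      · subst g2; decide
      by_cases g3 : c2 = 'N'
      · subst g3; decide
      by_cases g4 : c2 = 'R'
      · subst g4; decide
      have f0 : ('F' == c2) = false := by simp only [beq_eq_false_iff_ne]; exact fun hh => g0 hh.symm
      have f1 : ('M' == c2) = false := by simp only [beq_eq_false_iff_ne]; exact fun hh => g1 hh.symm
      have f2 : ('C' == c2) = false := by simp only [beq_eq_false_iff_ne]; exact fun hh => g2 hh.symm
      have f3 : ('N' == c2) = false := by simp only [beq_eq_false_iff_ne]; exact fun hh => g3 hh.symm
      have f4 : ('R' == c2) = false := by simp only [beq_eq_false_iff_ne]; exact fun hh => g4 hh.symm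
      simp [pvTrie, List.find?, String.ofList_eq, f0, g0, f1, g1, f2, g2, f3, g3, f4, g4]
    by_cases h5 : c1 = 'N'
    case pos =>
      subst h5
      by_cases g0 : c2 = 'R'
      · subst g0; decide
      by_cases g1 : c2 = 'I'
      · subst g1; decide
      have f0 : ('R' == c2) = false := by simp only [beq_eq_false_iff_ne]; exact fun hh => g0 hh.symm
      have f1 : ('I' == c2) = false := by simp only [beq_eq_false_iff_ne]; exact fun hh => g1 hh.symm
      simp [pvTrie, List.find?, String.ofList_eq, f0, g0, f1, g1]
    by_cases h6 : c1 = 'B'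
    case pos =>
      subst h6
      by_cases g0 : c2 = 'R'
      · subst g0; decide
      have f0 : ('R' == c2) = false := by simp only [beq_eq_false_iff_ne]; exact fun hh => g0 hh.symm
      simp [pvTrie, List.find?, String.ofList_eq, f0, g0]
    by_cases h7 : c1 = 'F'
    case pos =>
      subst h7
      by_cases g0 : c2 = 'U'
      · subst g0; decide
      have f0 : ('U' == c2) = false := by simp only [beq_eq_false_iff_ne]; exact fun hh => g0 hh.symm
      simp [pvTrie, List.find?, String.ofList_eq, f0, g0]
    by_cases h8 : c1 = 'T'
    case pos =>
      subst h8
      by_cases g0 : c2 = 'A'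
      · subst g0; decide
      have f0 : ('A' == c2) = false := by simp only [beq_eq_false_iff_ne]; exact fun hh => g0 hh.symm
      simp [pvTrie, List.find?, String.ofList_eq, f0, g0]
    by_cases h9 : c1 = 'E'
    case pos =>
      subst h9
      by_cases g0 : c2 = 'G'
      · subst g0; decide
      have f0 : ('G' == c2) = false := by simp only [beq_eq_false_iff_ne]; exact fun hh => g0 hh.symm
      simp [pvTrie, List.find?, String.ofList_eq, f0, g0]
    by_cases h10 : c1 = 'M'
    case pos =>
      subst h10
      by_cases g0 : c2 = 'A'
      · subst g0; decide
      have f0 : ('A' == c2) = false := by simp only [beq_eq_false_iff_ne]; exact fun hh => g0 hh.symm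
      simp [pvTrie, List.find?, String.ofList_eq, f0, g0]
    by_cases h11 : c1 = 'P'
    case pos =>
      subst h11
      by_cases g0 : c2 = 'P'
      · subst g0; decide
      by_cases g1 : c2 = 'B'
      · subst g1; decide
      have f0 : ('P' == c2) = false := by simp only [beq_eq_false_iff_ne]; exact fun hh => g0 hh.symm
      have f1 : ('B' == c2) = false := by simp only [beq_eq_false_iff_ne]; exact fun hh => g1 hh.symm
      simp [pvTrie, List.find?, String.ofList_eq, f0, g0, f1, g1]
    by_cases h12 : c1 = 'L'
    case pos =>
      subst h12
      simp [pvTrie, List.find?, String.ofList_eq]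
    by_cases h13 : c1 = 'V'
    case pos =>
      subst h13
      simp [pvTrie, List.find?, String.ofList_eq]
    by_cases h14 : c1 = 'C'
    case pos =>
      subst h14
      by_cases g0 : c2 = 'U'
      · subst g0; decide
      by_cases g1 : c2 = 'F'
      · subst g1; decide
      have f0 : ('U' == c2) = false := by simp only [beq_eq_false_iff_ne]; exact fun hh => g0 hh.symm
      have f1 : ('F' == c2) = false := by simp only [beq_eq_false_iff_ne]; exact fun hh => g1 hh.symm
      simp [pvTrie, List.find?, String.ofList_eq, f0, g0, f1, g1]
    by_cases h15 : c1 = 'A'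
    case pos =>
      subst h15
      by_cases g0 : c2 = 'L'
      · subst g0; decide
      have f0 : ('L' == c2) = false := by simp only [beq_eq_false_iff_ne]; exact fun hh => g0 hh.symm
      simp [pvTrie, List.find?, String.ofList_eq, f0, g0]
    by_cases h16 : c1 = 'Z'
    case pos =>
      subst h16
      by_cases g0 : c2 = 'N'
      · subst g0; decide
      have f0 : ('N' == c2) = false := by simp only [beq_eq_false_iff_ne]; exact fun hh => g0 hh.symm
      simp [pvTrie, List.find?, String.ofList_eq, f0, g0]
    by_cases h17 : c1 = 'Y'
    case pos =>
      subst h17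
      simp [pvTrie, List.find?, String.ofList_eq]
    have e0 : ('R' == c1) = false := by simp only [beq_eq_false_iff_ne]; exact fun hh => h0 hh.symm
    have e1 : ('H' == c1) = false := by simp only [beq_eq_false_iff_ne]; exact fun hh => h1 hh.symm
    have e2 : ('I' == c1) = false := by simp only [beq_eq_false_iff_ne]; exact fun hh => h2 hh.symm
    have e3 : ('J' == c1) = false := by simp only [beq_eq_false_iff_ne]; exact fun hh => h3 hh.symm
    have e4 : ('S' == c1) = false := by simp only [beq_eq_false_iff_ne]; exact fun hh => h4 hh.symm
    have e5 : ('N' == c1) = false := by simp only [beq_eq_false_iff_ne]; exact fun hh => h5 hh.symm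
    have e6 : ('B' == c1) = false := by simp only [beq_eq_false_iff_ne]; exact fun hh => h6 hh.symm
    have e7 : ('F' == c1) = false := by simp only [beq_eq_false_iff_ne]; exact fun hh => h7 hh.symm
    have e8 : ('T' == c1) = false := by simp only [beq_eq_false_iff_ne]; exact fun hh => h8 hh.symm
    have e9 : ('E' == c1) = false := by simp only [beq_eq_false_iff_ne]; exact fun hh => h9 hh.symm
    have e10 : ('M' == c1) = false := by simp only [beq_eq_false_iff_ne]; exact fun hh => h10 hh.symm
    have e11 : ('P' == c1) = false := by simp only [beq_eq_false_iff_ne]; exact fun hh => h11 hh.symm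
    have e12 : ('L' == c1) = false := by simp only [beq_eq_false_iff_ne]; exact fun hh => h12 hh.symm
    have e13 : ('V' == c1) = false := by simp only [beq_eq_false_iff_ne]; exact fun hh => h13 hh.symm
    have e14 : ('C' == c1) = false := by simp only [beq_eq_false_iff_ne]; exact fun hh => h14 hh.symm
    have e15 : ('A' == c1) = false := by simp only [beq_eq_false_iff_ne]; exact fun hh => h15 hh.symm
    have e16 : ('Z' == c1) = false := by simp only [beq_eq_false_iff_ne]; exact fun hh => h16 hh.symm
    have e17 : ('Y' == c1) = false := by simp only [beq_eq_false_iff_ne]; exact fun hh => h17 hh.symm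
    simp [pvTrie, List.find?, String.ofList_eq, e0, h0, e1, h1, e2, h2, e3, h3, e4, h4, e5, h5, e6, h6, e7, h7, e8, h8, e9, h9, e10, h10, e11, h11, e12, h12, e13, h13, e14, h14, e15, h15, e16, h16, e17, h17]

  | c1 :: c2 :: c3 :: rest =>
    simp [pvTrie, List.find?, String.ofList_eq]
    split <;> rfl

-- ===== VERDICT (by name: the statement is the Claim_ definition above) =====
theorem infer_category_from_symbol_spec : Claim_equal_infer_category_from_symbol := by
  intro symbol _
  unfold Spec_infer_category_from_symbol infer_category_from_symbol infer_category_from_symbol_alt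
  exact pvChain_eq_trie _
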